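-- pv_equiv track=rewrite | github.com/JoshTheBlack/Project-Euler-Solutions | 051.py | digitReplacement
-- ===== SOURCE A (Python) =====
-- def digitReplacement(orig, places):
--     result = []
--     for x in range(10):
--         number = str(orig)
--         count = 0
--         newNumber = ""
--         for digit in number:
--             if count in places: newNumber += str(x)
--             if count not in places: newNumber += digit
--             count += 1
--         result.append(int(newNumber))
--     return result
-- ===== SOURCE B (Python) =====
-- def digitReplacement(orig, places):
--     s = str(orig)
--     parts = []
--     buf = ""
--     for i, ch in enumerate(s):
--         if i in places:
--             parts.append(buf)
--             buf = ""
--         else: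
--             buf += ch
--     parts.append(buf)
--     return [int(str(x).join(parts)) for x in range(10)]
-- ===== Notes on version B (the rewrite author's own statement) =====
-- stated objective: alternative
-- what changed: B splits str(orig) once at the replaced positions and produces the ten variants by str(x).join of the precomputed parts, instead of A's ten per-character rebuild passes each testing membership in places for every position.
import Mathlib
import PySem

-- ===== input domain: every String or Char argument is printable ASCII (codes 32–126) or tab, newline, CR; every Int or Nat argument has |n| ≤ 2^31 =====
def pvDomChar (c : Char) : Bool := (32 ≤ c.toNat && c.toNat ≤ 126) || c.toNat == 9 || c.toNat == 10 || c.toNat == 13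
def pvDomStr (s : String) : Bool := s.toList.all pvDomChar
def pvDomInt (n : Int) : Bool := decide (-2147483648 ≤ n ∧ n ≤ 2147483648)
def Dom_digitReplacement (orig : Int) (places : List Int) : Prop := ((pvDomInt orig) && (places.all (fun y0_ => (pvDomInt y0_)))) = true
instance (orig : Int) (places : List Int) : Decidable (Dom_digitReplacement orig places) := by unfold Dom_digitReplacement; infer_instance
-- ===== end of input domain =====

-- B splits str(orig) once at the replaced positions and rebuilds the ten variants with
-- str(x).join of the precomputed parts, a split-then-join decomposition of A's ten
-- per-character rebuild passes (same cost in the timed check).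

-- ===== PORT A =====
def digitReplacement (orig : Int) (places : List Int) : List Int :=
  (PySem.List.pyRange 0 10 1).foldl
    (fun result x =>
      let number := PySem.Int.toChars orig
      let fin := number.foldl
        (fun (st : Int × List Char) digit =>
          let nn1 := if st.1 ∈ places then st.2 ++ PySem.Int.toChars x else st.2
          let nn2 := if st.1 ∉ places then nn1 ++ [digit] else nn1
          (st.1 + 1, nn2))
        ((0 : Int), ([] : List Char))
      -- int(newNumber): ofChars? is none exactly where Python's int() raises; newNumber is
      -- always an optional '-' followed by digits here, so the .getD default is unreachable.
      result ++ [(PySem.Int.ofChars? fin.2).getD 0])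
    ([] : List Int)

-- ===== PORT B =====
def digitReplacement_alt (orig : Int) (places : List Int) : List Int :=
  let s := PySem.Int.toChars orig
  let st := (PySem.List.enumerate s).foldl
    (fun (acc : List (List Char) × List Char) p =>
      if p.1 ∈ places then (acc.1 ++ [acc.2], ([] : List Char))
      else (acc.1, acc.2 ++ [p.2]))
    (([] : List (List Char)), ([] : List Char))
  let parts := st.1 ++ [st.2]
  (PySem.List.pyRange 0 10 1).map
    (fun x => (PySem.Int.ofChars? (PySem.Chars.join (PySem.Int.toChars x) parts)).getD 0)

-- ===== PRECONDITION & SPEC =====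
def Spec_digitReplacement (orig : Int) (places : List Int) (out : List Int) : Prop := out = digitReplacement_alt orig places
instance (orig : Int) (places : List Int) (out : List Int) : Decidable (Spec_digitReplacement orig places out) := by unfold Spec_digitReplacement; infer_instance

-- ===== CLAIM (what is proved, stated in full; the proofs are below) =====
def Claim_equal_digitReplacement : Prop := ∀ (orig : Int) (places : List Int), Dom_digitReplacement orig places → Spec_digitReplacement orig places (digitReplacement orig places)

-- ===== LEMMAS AND PROOFS =====

-- the replaced character list: the chunk at position i is w when i ∈ places, the original digit otherwise
def pvRep (places : List Int) (w : List Char) : List Char → Int → List Char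
  | [], _ => []
  | d :: l, i => ((if i ∈ places then w else []) ++ (if i ∉ places then [d] else [])) ++ pvRep places w l (i + 1)

-- A's inner loop appends exactly the replaced chunks after the accumulated string
theorem pvFoldA (places : List Int) (w : List Char) :
    ∀ (l : List Char) (i : Int) (nn : List Char),
      l.foldl
        (fun (st : Int × List Char) digit =>
          let nn1 := if st.1 ∈ places then st.2 ++ w else st.2
          let nn2 := if st.1 ∉ places then nn1 ++ [digit] else nn1
          (st.1 + 1, nn2))
        (i, nn)
      = (i + l.length, nn ++ pvRep places w l i) := by
  intro l
  induction l with
  | nil => intro i nn; simp [pvRep]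
  | cons d l ih =>
    intro i nn
    simp only [List.foldl_cons, pvRep, ih]
    refine Prod.ext ?_ ?_
    · show i + 1 + (l.length : Int) = i + ((d :: l).length : Int)
      simp [List.length_cons]; ring
    · by_cases h : i ∈ places <;> simp [h, List.append_assoc]

theorem pvJoin_snoc (w c : List Char) :
    ∀ (qs : List (List Char)), qs ≠ [] →
      PySem.Chars.join w (qs ++ [c]) = PySem.Chars.join w qs ++ w ++ c := by
  intro qs
  induction qs with
  | nil => intro h; exact absurd rfl h
  | cons q t ih =>
    intro _
    cases t with
    | nil => simp [PySem.Chars.join_cons_cons, PySem.Chars.join_singleton]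
    | cons r u =>
      have := ih (by simp)
      simp only [List.cons_append, PySem.Chars.join_cons_cons] at this ⊢
      simp [this, List.append_assoc]

theorem pvJoin_last_append (w c : List Char) :
    ∀ (ps : List (List Char)) (b : List Char),
      PySem.Chars.join w (ps ++ [b ++ c]) = PySem.Chars.join w (ps ++ [b]) ++ c := by
  intro ps
  induction ps with
  | nil => intro b; simp [PySem.Chars.join_singleton]
  | cons q t ih =>
    intro b
    cases t with
    | nil => simp [PySem.Chars.join_cons_cons, PySem.Chars.join_singleton, List.append_assoc]
    | cons r u =>
      have := ih b
      simp only [List.cons_append, PySem.Chars.join_cons_cons] at this ⊢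
      simp [this, List.append_assoc]

-- B's split-then-join over the remaining positions continues A's replaced string
theorem pvFoldB (places : List Int) (w : List Char) :
    ∀ (l : List Char) (i : Int) (ps : List (List Char)) (buf : List Char),
      PySem.Chars.join w
        ((((PySem.List.enumerate l i).foldl
            (fun (acc : List (List Char) × List Char) p =>
              if p.1 ∈ places then (acc.1 ++ [acc.2], ([] : List Char))
              else (acc.1, acc.2 ++ [p.2]))
            (ps, buf)).1)
          ++ [((PySem.List.enumerate l i).foldl
            (fun (acc : List (List Char) × List Char) p =>
              if p.1 ∈ places then (acc.1 ++ [acc.2], ([] : List Char))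
              else (acc.1, acc.2 ++ [p.2]))
            (ps, buf)).2])
      = PySem.Chars.join w (ps ++ [buf]) ++ pvRep places w l i := by
  intro l
  induction l with
  | nil => intro i ps buf; simp [PySem.List.enumerate_nil, pvRep]
  | cons d l ih =>
    intro i ps buf
    rw [PySem.List.enumerate_cons]
    simp only [List.foldl_cons]
    by_cases h : i ∈ places
    · simp only [h, if_pos]
      rw [ih (i+1) (ps ++ [buf]) []]
      rw [pvJoin_snoc w [] (ps ++ [buf]) (by simp)]
      simp [pvRep, h, List.append_assoc]
    · simp only [h, if_false]
      rw [ih (i+1) ps (buf ++ [d])]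
      rw [pvJoin_last_append w [d] ps buf]
      simp [pvRep, h, List.append_assoc]

-- ===== VERDICT (by name: the statement is the Claim_ definition above) =====
theorem digitReplacement_spec : Claim_equal_digitReplacement := by
  intro orig places _
  unfold Spec_digitReplacement digitReplacement digitReplacement_alt
  rw [PySem.List.foldl_append_singleton_eq_map
      (fun x => (PySem.Int.ofChars? (((PySem.Int.toChars orig).foldl
        (fun (st : Int × List Char) digit =>
          let nn1 := if st.1 ∈ places then st.2 ++ PySem.Int.toChars x else st.2
          let nn2 := if st.1 ∉ places then nn1 ++ [digit] else nn1
          (st.1 + 1, nn2))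
        ((0 : Int), ([] : List Char))).2)).getD 0)]
  simp only [List.nil_append]
  refine List.map_congr_left ?_
  intro x _
  rw [pvFoldA places (PySem.Int.toChars x) (PySem.Int.toChars orig) 0 []]
  rw [pvFoldB places (PySem.Int.toChars x) (PySem.Int.toChars orig) 0 [] []]
  simp [PySem.Chars.join_singleton]
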